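-- pv_equiv track=rewrite | github.com/andricfilip/pip1 | inputs/Students/Aleksa_Radivojevic762021/Zadatak1.py | oduzimanje
-- ===== SOURCE A (Python) =====
-- def oduzimanje(lista):
--     br=0
--     for element in lista:
--         br=br+1
--     c=int(lista[0])
--     for i in range(1,br):
--         c=c-int(lista[i])
--     return c
--
-- lista=[]
-- ===== SOURCE B (Python) =====
-- def oduzimanje(lista):
--     total = sum(int(x) for x in lista)
--     return 2 * int(lista[0]) - total
-- ===== Notes on version B (the rewrite author's own statement) =====
-- stated objective: simpler
-- what changed: Replaces the manual length count plus index loop with a single sum of all elements and the closed-form correction 2*lista[0] - total.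
import Mathlib
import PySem

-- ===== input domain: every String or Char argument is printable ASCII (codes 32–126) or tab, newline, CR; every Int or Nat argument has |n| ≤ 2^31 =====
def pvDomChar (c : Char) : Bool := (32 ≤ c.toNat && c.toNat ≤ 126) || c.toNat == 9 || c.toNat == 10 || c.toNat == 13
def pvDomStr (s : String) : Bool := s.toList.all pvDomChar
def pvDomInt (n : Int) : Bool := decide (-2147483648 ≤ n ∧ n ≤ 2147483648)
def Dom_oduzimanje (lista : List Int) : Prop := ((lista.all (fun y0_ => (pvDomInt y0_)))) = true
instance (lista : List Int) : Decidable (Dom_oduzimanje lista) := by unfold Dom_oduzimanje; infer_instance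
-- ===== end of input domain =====

-- B replaces A's count-then-index loop with one sum and the closed form 2*lista[0] - total (objective: simpler).

-- ===== PORT A =====
def oduzimanje (lista : List Int) : Int :=
  let br : Int := lista.foldl (fun b _ => b + 1) 0
  let c : Int := (PySem.List.pyGet? lista 0).getD 0
  (PySem.List.pyRange 1 br 1).foldl (fun c i => c - PySem.List.pyGetD lista i 0) c

-- ===== PORT B =====
def oduzimanje_alt (lista : List Int) : Int :=
  let total : Int := lista.sum
  2 * (PySem.List.pyGet? lista 0).getD 0 - total

-- ===== PRECONDITION & SPEC =====
-- Pre_ excludes only the empty list, on which the Python A (and B) raise IndexError at lista[0].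
def Pre_oduzimanje (lista : List Int) : Prop := lista ≠ []
instance (lista : List Int) : Decidable (Pre_oduzimanje lista) := by unfold Pre_oduzimanje; infer_instance
def pvWitness_oduzimanje : List Int := ([5, 2, 1])
def Spec_oduzimanje (lista : List Int) (out : Int) : Prop := out = oduzimanje_alt lista
instance (lista : List Int) (out : Int) : Decidable (Spec_oduzimanje lista out) := by unfold Spec_oduzimanje; infer_instance

-- ===== CLAIM (what is proved, stated in full; the proofs are below) =====
def Claim_equal_oduzimanje : Prop := ∀ (lista : List Int), Dom_oduzimanje lista → Pre_oduzimanje lista → Spec_oduzimanje lista (oduzimanje lista)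

-- ===== LEMMAS AND PROOFS =====

theorem pv_count (lista : List Int) : lista.foldl (fun b _ => b + 1) (0 : Int) = PySem.List.len lista := by
  have := PySem.List.foldl_add (l := lista) (g := fun _ => (1 : Int)) (a := 0)
  simpa [PySem.List.len_eq] using this

theorem pv_sub_foldl (t : List Int) (a : Int) :
    t.foldl (fun c x => c - x) a = a - t.sum := by
  induction t generalizing a with
  | nil => simp
  | cons x xs ih => simp [ih]; ring

-- ===== VERDICT (by name: the statement is the Claim_ definition above) =====
theorem oduzimanje_spec : Claim_equal_oduzimanje := by
  intro lista _ hpre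
  unfold Spec_oduzimanje oduzimanje oduzimanje_alt
  obtain ⟨a, t, rfl⟩ := List.exists_cons_of_ne_nil hpre
  simp only [pv_count]
  rw [PySem.List.foldl_pyRange_pyGetD (xs := a :: t) (d := (0 : Int))
      (f := fun c x => c - x) (init := (PySem.List.pyGet? (a :: t) 0).getD 0) (a := 1) (by norm_num)]
  simp [pv_sub_foldl, PySem.List.pyGet?, PySem.List.pyIdx?]
  ring
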